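-- pv_equiv track=rewrite | github.com/midnight-repo/stdin_processor | stdin_processor/processor.py | backslashed
-- ===== SOURCE A (Python) =====
-- def backslashed(string):
--     s = string
--     backslash_chars = {
--         '\\n': '\n',
--         '\\r': '\r',
--         '\\t': '\t'
--     }
--     for char in backslash_chars:
--         if char in s or char == s:
--             s = s.replace(char, backslash_chars[char])
--     return s
-- ===== SOURCE B (Python) =====
-- def backslashed(string):
--     out = []
--     i = 0
--     n = len(string)
--     while i < n:
--         two = string[i:i+2]
--         if two == '\\n':
--             out.append('\n')
--             i += 2
--         elif two == '\\r':
--             out.append('\r')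
--             i += 2
--         elif two == '\\t':
--             out.append('\t')
--             i += 2
--         else:
--             out.append(string[i])
--             i += 1
--     return ''.join(out)
-- ===== Notes on version B (the rewrite author's own statement) =====
-- stated objective: alternative
-- what changed: Replaced the three sequential str.replace passes with a single left-to-right index scan that inspects string[i:i+2] and emits the control character or the current character, joining at the end.
import Mathlib
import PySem

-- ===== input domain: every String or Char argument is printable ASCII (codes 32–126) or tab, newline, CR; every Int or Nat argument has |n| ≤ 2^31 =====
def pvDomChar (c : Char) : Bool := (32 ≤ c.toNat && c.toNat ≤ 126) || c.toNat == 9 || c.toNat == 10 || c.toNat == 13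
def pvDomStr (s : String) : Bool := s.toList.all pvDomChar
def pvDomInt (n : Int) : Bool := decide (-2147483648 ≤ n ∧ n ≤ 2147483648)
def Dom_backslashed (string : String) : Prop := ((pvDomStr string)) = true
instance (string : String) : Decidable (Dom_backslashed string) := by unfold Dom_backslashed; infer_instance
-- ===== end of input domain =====

-- B replaces A's three sequential str.replace passes with a single left-to-right
-- two-character scan (alternative decomposition; same return value on every string).

-- ===== PORT A =====
-- literal port of A: a dict of escape sequences, then one replace pass per key in insertion order
def backslashed (string : String) : String :=
  let s := string
  let backslash_chars : PySem.Dict String String :=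
    ((PySem.Dict.empty.insert "\\n" "\n").insert "\\r" "\r").insert "\\t" "\t"
  backslash_chars.keys.foldl
    (fun s char =>
      if PySem.Str.isIn char s || char == s then
        PySem.Str.replace s char ((backslash_chars.get? char).getD "")
      else s) s

-- ===== PORT B =====
-- literal port of B: scan the characters left to right; string[i:i+2] is the next
-- (up to) two characters, compared against the three escape sequences in Source B's order
def pvScan : List Char → List Char
  | c1 :: c2 :: rest =>
      if c1 = '\\' ∧ c2 = 'n' then '\n' :: pvScan rest
      else if c1 = '\\' ∧ c2 = 'r' then '\r' :: pvScan rest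
      else if c1 = '\\' ∧ c2 = 't' then '\t' :: pvScan rest
      else c1 :: pvScan (c2 :: rest)
  | [c] => [c]
  | [] => []
termination_by cs => cs.length

def backslashed_alt (string : String) : String :=
  String.ofList (pvScan string.toList)

-- ===== PRECONDITION & SPEC =====
def Spec_backslashed (string : String) (out : String) : Prop := out = backslashed_alt string
instance (string : String) (out : String) : Decidable (Spec_backslashed string out) := by unfold Spec_backslashed; infer_instance

-- ===== CLAIM (what is proved, stated in full; the proofs are below) =====
def Claim_equal_backslashed : Prop := ∀ (string : String), Dom_backslashed string → Spec_backslashed string (backslashed string)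

-- ===== LEMMAS AND PROOFS =====

-- one non-overlapping left-to-right replacement pass of the two-char pattern [p,q] by [r]
def rep2 (p q r : Char) : List Char → List Char
  | c1 :: c2 :: rest =>
      if c1 = p ∧ c2 = q then r :: rep2 p q r rest
      else c1 :: rep2 p q r (c2 :: rest)
  | [c] => [c]
  | [] => []
termination_by cs => cs.length

theorem rep2_nil (p q r : Char) : rep2 p q r [] = [] := by rw [rep2]

theorem rep2_singleton (p q r c : Char) : rep2 p q r [c] = [c] := by rw [rep2]

theorem rep2_match (p q r : Char) (t : List Char) :
    rep2 p q r (p :: q :: t) = r :: rep2 p q r t := by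
  rw [rep2]; simp

theorem rep2_not_match (p q r a b : Char) (t : List Char) (h : ¬ (a = p ∧ b = q)) :
    rep2 p q r (a :: b :: t) = a :: rep2 p q r (b :: t) := by
  rw [rep2]; simp [h]

theorem rep2_cons_ne (p q r a : Char) (t : List Char) (h : a ≠ p) :
    rep2 p q r (a :: t) = a :: rep2 p q r t := by
  cases t with
  | nil => rw [rep2, rep2]
  | cons b t2 => exact rep2_not_match p q r a b t2 (by simp [h])

-- the head of a replacement pass over a nonempty list is the old head or the replacement char
theorem rep2_head (p q r y : Char) (t : List Char) :
    ∃ ts, rep2 p q r (y :: t) = r :: ts ∨ rep2 p q r (y :: t) = y :: ts := by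
  cases t with
  | nil => exact ⟨[], Or.inr (rep2_singleton p q r y)⟩
  | cons b t2 =>
    by_cases h : y = p ∧ b = q
    · exact ⟨rep2 p q r t2, Or.inl (by rw [h.1, h.2]; exact rep2_match p q r t2)⟩
    · exact ⟨rep2 p q r (b :: t2), Or.inr (rep2_not_match p q r y b t2 h)⟩

-- PySem's replace on a two-char pattern IS rep2
theorem go_eq (p q r : Char) : ∀ (fuel : Nat) (l acc : List Char), l.length ≤ fuel →
    PySem.Chars.replace.go [p,q] [r] fuel l acc = acc.reverse ++ rep2 p q r l := by
  intro fuel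
  induction fuel with
  | zero =>
    intro l acc h
    have hl : l = [] := by cases l <;> simp_all
    subst hl; simp [PySem.Chars.replace.go, rep2]
  | succ n ih =>
    intro l acc h
    match l with
    | [] => simp [PySem.Chars.replace.go, rep2]
    | [c] =>
      simp only [PySem.Chars.replace.go]
      have hnp : ¬ (List.isPrefixOf [p,q] [c] = true) := by simp [List.isPrefixOf]
      rw [if_neg hnp, ih [] (c::acc) (by simp), rep2, rep2]
      simp
    | c :: b :: t =>
      simp only [PySem.Chars.replace.go]
      by_cases hm : c = p ∧ b = q
      · obtain ⟨hc, hb⟩ := hm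
        subst hc; subst hb
        have hp : List.isPrefixOf [c,b] (c::b::t) = true := by
          simp [List.isPrefixOf]
        rw [if_pos hp]
        have ht : t.length ≤ n := by simp at h; omega
        rw [show List.drop [c,b].length (c::b::t) = t from rfl, ih t _ ht, rep2]
        simp
      · have hnp : ¬ (List.isPrefixOf [p,q] (c::b::t) = true) := by
          simp [List.isPrefixOf]; intro hc hb; exact hm ⟨hc.symm, hb.symm⟩
        rw [if_neg hnp, ih (b::t) (c::acc) (by simp at h ⊢; omega),
            rep2_not_match p q r c b t hm]
        simp

theorem replace_eq_rep2 (p q r : Char) (s : List Char) :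
    PySem.Chars.replace s [p,q] [r] = rep2 p q r s := by
  rw [PySem.Chars.replace, if_neg (by simp)]
  exact go_eq p q r s.length s [] le_rfl

-- if the pattern does not occur, the pass is the identity
theorem rep2_id_of_not_infix (p q r : Char) : ∀ (n : Nat) (s : List Char), s.length ≤ n →
    ¬ ([p,q] <:+: s) → rep2 p q r s = s := by
  intro n
  induction n with
  | zero =>
    intro s hlen _
    have hs : s = [] := by cases s <;> simp_all
    subst hs; exact rep2_nil p q r
  | succ n ih =>
    intro s hlen h
    match s with
    | [] => exact rep2_nil p q r
    | [c] => exact rep2_singleton p q r c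
    | c :: b :: t =>
      by_cases hm : c = p ∧ b = q
      · exact absurd ((show [p,q] <+: c :: b :: t by rw [hm.1, hm.2]; exact ⟨t, rfl⟩).isInfix) h
      · rw [rep2_not_match p q r c b t hm,
            ih (b :: t) (by simp at hlen ⊢; omega)
              (fun hinf => h (hinf.trans (List.suffix_cons c (b :: t)).isInfix))]

-- A's guarded replace step, on the character lists
theorem step_eq (p q r : Char) (k v s : String)
    (hk : k.toList = [p, q]) (hv : v.toList = [r]) :
    (if PySem.Str.isIn k s || k == s then PySem.Str.replace s k v else s).toList
      = rep2 p q r s.toList := by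
  by_cases h : PySem.Str.isIn k s = true
  · rw [if_pos (by rw [h]; rfl)]
    rw [show (PySem.Str.replace s k v).toList
          = PySem.Chars.replace s.toList k.toList v.toList from String.toList_ofList]
    rw [hk, hv, replace_eq_rep2]
  · have hne : (k == s) ≠ true := by
      intro hx
      have hks : k = s := by simpa using hx
      apply h
      exact (PySem.Str.isIn_iff_infix k s).mpr (by rw [hks])
    rw [if_neg (by
      intro hx
      rcases Bool.or_eq_true_iff.mp hx with h' | h'
      · exact h h'
      · exact hne h')]
    have hni : ¬ ([p,q] <:+: s.toList) := by
      rw [← hk]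
      intro hinf
      exact h ((PySem.Str.isIn_iff_infix k s).mpr hinf)
    exact (rep2_id_of_not_infix p q r s.toList.length s.toList le_rfl hni).symm

-- the single scan equals the three sequential passes in A's key order
theorem scan_eq_chain : ∀ (n : Nat) (s : List Char), s.length ≤ n →
    rep2 '\\' 't' '\t' (rep2 '\\' 'r' '\r' (rep2 '\\' 'n' '\n' s)) = pvScan s := by
  intro n
  induction n with
  | zero =>
    intro s h
    have hs : s = [] := by cases s <;> simp_all
    subst hs; rw [rep2_nil, rep2_nil, rep2_nil, pvScan]
  | succ n ih =>
    intro s h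
    match s with
    | [] => rw [rep2_nil, rep2_nil, rep2_nil, pvScan]
    | [c] => rw [rep2_singleton, rep2_singleton, rep2_singleton, pvScan]
    | c :: b :: t =>
      have ht : t.length ≤ n := by simp at h; omega
      have hbt : (b :: t).length ≤ n := by simp at h ⊢; omega
      by_cases hc : c = '\\'
      · subst hc
        by_cases hn : b = 'n'
        · subst hn
          rw [rep2_match '\\' 'n' '\n' t,
              rep2_cons_ne '\\' 'r' '\r' '\n' (rep2 '\\' 'n' '\n' t) (by decide),
              rep2_cons_ne '\\' 't' '\t' '\n' (rep2 '\\' 'r' '\r' (rep2 '\\' 'n' '\n' t)) (by decide),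
              pvScan]
          simp [ih t ht]
        · by_cases hr : b = 'r'
          · subst hr
            rw [rep2_not_match '\\' 'n' '\n' '\\' 'r' t (by decide),
                rep2_cons_ne '\\' 'n' '\n' 'r' t (by decide),
                rep2_match '\\' 'r' '\r' (rep2 '\\' 'n' '\n' t),
                rep2_cons_ne '\\' 't' '\t' '\r' (rep2 '\\' 'r' '\r' (rep2 '\\' 'n' '\n' t)) (by decide),
                pvScan]
            simp [ih t ht]
          · by_cases htc : b = 't'
            · subst htc
              rw [rep2_not_match '\\' 'n' '\n' '\\' 't' t (by decide),
                  rep2_cons_ne '\\' 'n' '\n' 't' t (by decide),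
                  rep2_not_match '\\' 'r' '\r' '\\' 't' (rep2 '\\' 'n' '\n' t) (by decide),
                  rep2_cons_ne '\\' 'r' '\r' 't' (rep2 '\\' 'n' '\n' t) (by decide),
                  rep2_match '\\' 't' '\t' (rep2 '\\' 'r' '\r' (rep2 '\\' 'n' '\n' t)),
                  pvScan]
              simp [ih t ht]
            · -- b is none of n/r/t: the backslash passes through all three passes
              rw [rep2_not_match '\\' 'n' '\n' '\\' b t (by simp [hn])]
              obtain ⟨ts1, h1⟩ := rep2_head '\\' 'n' '\n' b t
              have hz1 : ∃ z1, rep2 '\\' 'n' '\n' (b :: t) = z1 :: ts1 ∧ z1 ≠ 'r' ∧ z1 ≠ 't' := by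
                rcases h1 with h1 | h1
                · exact ⟨'\n', h1, by decide, by decide⟩
                · exact ⟨b, h1, hr, htc⟩
              obtain ⟨z1, hz1e, hz1r, hz1t⟩ := hz1
              rw [hz1e, rep2_not_match '\\' 'r' '\r' '\\' z1 ts1 (by simp [hz1r]), ← hz1e]
              obtain ⟨ts2, h2⟩ := rep2_head '\\' 'r' '\r' z1 ts1
              have hz2 : ∃ z2, rep2 '\\' 'r' '\r' (z1 :: ts1) = z2 :: ts2 ∧ z2 ≠ 't' := by
                rcases h2 with h2 | h2
                · exact ⟨'\r', h2, by decide⟩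
                · exact ⟨z1, h2, hz1t⟩
              obtain ⟨z2, hz2e, hz2t⟩ := hz2
              rw [hz1e, hz2e, rep2_not_match '\\' 't' '\t' '\\' z2 ts2 (by simp [hz2t]),
                  ← hz2e, ← hz1e, pvScan, ih (b :: t) hbt]
              simp [hn, hr, htc]
      · rw [rep2_cons_ne '\\' 'n' '\n' c (b :: t) hc,
            rep2_cons_ne '\\' 'r' '\r' c (rep2 '\\' 'n' '\n' (b :: t)) hc,
            rep2_cons_ne '\\' 't' '\t' c (rep2 '\\' 'r' '\r' (rep2 '\\' 'n' '\n' (b :: t))) hc,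
            pvScan, ih (b :: t) hbt]
        simp [hc]

-- ===== VERDICT (by name: the statement is the Claim_ definition above) =====
theorem backslashed_spec : Claim_equal_backslashed := by
  intro s _
  unfold Spec_backslashed
  apply String.toList_inj.mp
  have hkeys : (((PySem.Dict.empty.insert "\\n" "\n").insert "\\r" "\r").insert "\\t" "\t"
      : PySem.Dict String String).keys = ["\\n", "\\r", "\\t"] := by decide
  have hg1 : (((((PySem.Dict.empty.insert "\\n" "\n").insert "\\r" "\r").insert "\\t" "\t"
      : PySem.Dict String String).get? "\\n").getD "") = "\n" := by decide
  have hg2 : (((((PySem.Dict.empty.insert "\\n" "\n").insert "\\r" "\r").insert "\\t" "\t"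
      : PySem.Dict String String).get? "\\r").getD "") = "\r" := by decide
  have hg3 : (((((PySem.Dict.empty.insert "\\n" "\n").insert "\\r" "\r").insert "\\t" "\t"
      : PySem.Dict String String).get? "\\t").getD "") = "\t" := by decide
  simp only [backslashed, hkeys, List.foldl_cons, List.foldl_nil, hg1, hg2, hg3]
  rw [step_eq '\\' 't' '\t' "\\t" "\t" _ (by decide) (by decide),
      step_eq '\\' 'r' '\r' "\\r" "\r" _ (by decide) (by decide),
      step_eq '\\' 'n' '\n' "\\n" "\n" _ (by decide) (by decide),
      scan_eq_chain s.toList.length s.toList le_rfl]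
  exact (String.toList_ofList).symm
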